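-- pv_equiv track=rewrite | github.com/cih831/Algorithm | programmers/2개이하로다른비트.py | solution
-- ===== SOURCE A (Python) =====
-- def solution(numbers):
--     answer = []
--     for num in numbers:
--         if not num % 2:
--             answer.append(num + 1)
--         else:
--             for i in range(500000000000000):
--                 if not (num - ((2 ** i) - 1)) % (2 ** (i + 1)):
--                     answer.append(num + 2 ** (i - 1))
--                     break
--     return answer
-- ===== SOURCE B (Python) =====
-- def solution(numbers):
--     def next_num(num):
--         if num % 2 == 0:
--             return num + 1
--         low = ~num & (num + 1)   # lowest zero bit of num, as a power of two
--         return num + (low >> 1)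
--     return [next_num(num) for num in numbers]
-- ===== Notes on version B (the rewrite author's own statement) =====
-- stated objective: faster
-- what changed: Replaces A's inner linear search over exponents i (each test building 2**i and 2**(i+1) and taking a big-int modulus) by the constant-time bit trick ~num & (num+1), which yields the lowest zero bit of num directly; the unbounded inner loop disappears.
-- outside the precondition, e.g. on solution([-1]): A does not finish within the time limit, B returns [-1]
import Mathlib
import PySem

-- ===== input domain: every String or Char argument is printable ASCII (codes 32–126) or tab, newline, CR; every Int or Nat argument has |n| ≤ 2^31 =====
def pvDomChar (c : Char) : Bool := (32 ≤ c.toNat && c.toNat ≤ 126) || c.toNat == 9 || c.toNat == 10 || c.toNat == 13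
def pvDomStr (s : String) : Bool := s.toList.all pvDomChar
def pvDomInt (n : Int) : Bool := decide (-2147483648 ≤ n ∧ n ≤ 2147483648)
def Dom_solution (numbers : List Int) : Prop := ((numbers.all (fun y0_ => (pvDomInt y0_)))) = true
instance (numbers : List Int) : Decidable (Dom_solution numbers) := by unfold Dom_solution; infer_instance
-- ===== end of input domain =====

-- B replaces A's inner search over exponents by the O(1) bit trick ~num & (num+1) (lowest zero bit); objective: faster.

-- ===== PORT A =====
-- Inner 'for i in range(500000000000000)' loop: fuel-counted recursion, i is the loop index.
-- (Python's '2 ** (i - 1)' is only ever evaluated with i ≥ 1, since the i = 0 test 'num % 2 == 0'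
--  is false for the odd num this loop is run on; the Nat 'i - 1' agrees there.)
def solutionLoop (num : Int) (i : Nat) : Nat → Option Int
  | 0 => none
  | fuel + 1 =>
      if PySem.Int.mod (num - ((2:Int) ^ i - 1)) ((2:Int) ^ (i + 1)) = 0 then
        some (num + (2:Int) ^ (i - 1))
      else solutionLoop num (i + 1) fuel

def solution (numbers : List Int) : List Int :=
  numbers.foldl (fun answer num =>
    if PySem.Int.mod num 2 = 0 then answer ++ [num + 1]
    else
      match solutionLoop num 0 500000000000000 with
      | some v => answer ++ [v]      -- the break appended v
      | none => answer)              -- loop exhausted without break: nothing appended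
    []

-- ===== PORT B =====
def nextNum (num : Int) : Int :=
  if PySem.Int.mod num 2 = 0 then num + 1
  else
    -- low = ~num & (num + 1);  return num + (low >> 1)
    num + (PySem.Int.band (Int.not num) (num + 1)) >>> (1 : Nat)

def solution_alt (numbers : List Int) : List Int := numbers.map nextNum

-- ===== PRECONDITION & SPEC =====
-- Pre_ excludes lists containing -1: there A's inner search for a zero bit of -1 (which has none)
-- grinds through 5*10^14 big-int iterations — it effectively diverges and no value is observable.
def Pre_solution (numbers : List Int) : Prop := (-1 : Int) ∉ numbers
instance (numbers : List Int) : Decidable (Pre_solution numbers) := by unfold Pre_solution; infer_instance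
def pvWitness_solution : List Int := [3, 6, -5, 0]

def Spec_solution (numbers : List Int) (out : List Int) : Prop := out = solution_alt numbers
instance (numbers : List Int) (out : List Int) : Decidable (Spec_solution numbers out) := by unfold Spec_solution; infer_instance

-- ===== CLAIM (what is proved, stated in full; the proofs are below) =====
def Claim_equal_solution : Prop := ∀ (numbers : List Int), Dom_solution numbers → Pre_solution numbers → Spec_solution numbers (solution numbers)

-- ===== LEMMAS AND PROOFS =====

-- (2a+1) &&& (2b) = 2*(a &&& b)
theorem land_odd_even (a b : Nat) : (2*a+1) &&& (2*b) = 2*(a &&& b) := by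
  apply Nat.eq_of_testBit_eq
  intro i
  cases i with
  | zero => simp [Nat.testBit_zero, Nat.mul_mod_right]
  | succ i =>
      rw [Nat.testBit_and, Nat.testBit_succ, Nat.testBit_succ, Nat.testBit_succ]
      have e1 : (2*a+1)/2 = a := by omega
      have e2 : (2*b)/2 = b := by omega
      have e3 : (2*(a &&& b))/2 = a &&& b := by omega
      rw [e1, e2, e3, Nat.testBit_and]

-- (2a) &&& (2b+1) = 2*(a &&& b)
theorem land_even_odd (a b : Nat) : (2*a) &&& (2*b+1) = 2*(a &&& b) := by
  apply Nat.eq_of_testBit_eq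
  intro i
  cases i with
  | zero => simp [Nat.testBit_zero, Nat.mul_mod_right]
  | succ i =>
      rw [Nat.testBit_and, Nat.testBit_succ, Nat.testBit_succ, Nat.testBit_succ]
      have e1 : (2*b+1)/2 = b := by omega
      have e2 : (2*a)/2 = a := by omega
      have e3 : (2*(a &&& b))/2 = a &&& b := by omega
      rw [e1, e2, e3, Nat.testBit_and]

-- lowest set bit as a subtraction: N = 2^k * o with o odd → N - (N &&& (N-1)) = 2^k
theorem sub_land_pred (k : Nat) : ∀ o : Nat, o % 2 = 1 → 2^k*o - (2^k*o &&& (2^k*o - 1)) = 2^k := by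
  induction k with
  | zero =>
      intro o ho
      obtain ⟨j, rfl⟩ : ∃ j, o = 2*j+1 := ⟨o/2, by omega⟩
      simp only [pow_zero, one_mul]
      have h : (2*j+1) - 1 = 2*j := by omega
      rw [h, land_odd_even]
      simp
  | succ k ih =>
      intro o ho
      have hpos : 0 < 2^k*o := Nat.mul_pos (Nat.pow_pos (by norm_num)) (by omega)
      have h2 : 2^(k+1)*o - 1 = 2*((2^k*o) - 1) + 1 := by
        have : 2^(k+1)*o = 2*(2^k*o) := by ring
        omega
      have h1 : 2^(k+1)*o = 2*(2^k*o) := by ring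
      rw [h2, h1, land_even_odd]
      have hle : (2^k*o) &&& (2^k*o - 1) ≤ 2^k*o := Nat.and_le_left
      have hih := ih o ho
      have hp : (2:Nat)^(k+1) = 2*2^k := by ring
      omega

-- ~num & (num+1) = 2^k when |num+1| = 2^k * o with o odd  (num odd, num ≠ -1)
theorem band_lowbit (num : Int) (k o : Nat) (ho : o % 2 = 1)
    (hodd : ¬ (2:Int) ∣ num) (hne : num ≠ -1)
    (hN : (num + 1).natAbs = 2^k*o) :
    PySem.Int.band (Int.not num) (num + 1) = ((2:Int)^k : Int) := by
  have hrange : 1 ≤ num ∨ num ≤ -3 := by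
    rcases Int.even_or_odd num with he | hodd'
    · obtain ⟨t, rfl⟩ := he
      exact absurd ⟨t, by ring⟩ hodd
    · obtain ⟨t, rfl⟩ := hodd'
      omega
  have hnot : Int.not num = -num - 1 := by
    cases num with
    | ofNat n => rw [Int.not]; first | omega | (rw [Int.negSucc_eq, Int.ofNat_eq_natCast]; ring)
    | negSucc n => rw [Int.not]; first | omega | (rw [Int.negSucc_eq, Int.ofNat_eq_natCast]; ring)
  have key := sub_land_pred k o ho
  set N := 2^k*o with hNdef
  rcases hrange with hpos | hneg
  · -- num ≥ 1: band (-num-1) (num+1), first arg negative, second nonneg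
    have hb : (num+1).toNat = N := by omega
    have hbm : num.toNat = N - 1 := by omega
    rw [hnot]
    simp only [PySem.Int.band]
    rw [if_neg (by omega), if_pos (by omega)]
    have harg : -(-num - 1) - 1 = num := by ring
    rw [harg, hb, hbm, key]
    push_cast
    ring
  · -- num ≤ -3: band (-num-1) (num+1), first arg nonneg, second negative
    have hb : (-num - 1).toNat = N := by omega
    have hbm : (-(num + 1) - 1).toNat = N - 1 := by omega
    rw [hnot]
    simp only [PySem.Int.band]
    rw [if_pos (by omega), if_neg (by omega)]
    rw [hb, hbm, key]
    push_cast
    ring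

-- condition of A's inner loop: holds exactly at j = k
theorem cond_iff (num : Int) (j k o : Nat) (ho : o % 2 = 1) (hjk : j ≤ k)
    (hval : num + 1 = ((2^k*o : Nat) : Int) ∨ num + 1 = -((2^k*o : Nat) : Int)) :
    (PySem.Int.mod (num - ((2:Int) ^ j - 1)) ((2:Int) ^ (j + 1)) = 0 ↔ j = k) := by
  rw [PySem.Int.mod_eq_zero_iff_dvd]
  have hx : num - ((2:Int) ^ j - 1) = (num + 1) - 2 ^ j := by ring
  rw [hx]
  have hfac : ∀ ε : Int, (ε = 1 ∨ ε = -1) →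
      (ε * ((2^k*o : Nat) : Int) - 2 ^ j) = 2 ^ j * (ε * 2 ^ (k - j) * (o : Int) - 1) := by
    intro ε hε
    have : ((2^k*o : Nat) : Int) = 2 ^ k * (o : Int) := by push_cast; ring
    rw [this]
    have hk : (2:Int) ^ k = 2 ^ j * 2 ^ (k - j) := by
      rw [← pow_add]
      congr 1
      omega
    rw [hk]; ring
  have key : ∀ ε : Int, (ε = 1 ∨ ε = -1) → num + 1 = ε * ((2^k*o : Nat) : Int) →
      ((2:Int) ^ (j+1) ∣ (num + 1) - 2 ^ j ↔ j = k) := by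
    intro ε hε hv
    rw [hv, hfac ε hε, pow_succ,
        mul_dvd_mul_iff_left (a := (2:Int)^j) (pow_ne_zero _ (by norm_num))]
    constructor
    · intro hdvd
      by_contra hne
      have hjlt : j < k := by omega
      have h2 : (2:Int) ^ (k - j) = 2 * 2 ^ (k - j - 1) := by
        rw [← pow_succ']
        congr 1
        omega
      rw [h2] at hdvd
      have hform : ε * (2 * 2 ^ (k - j - 1)) * (o : Int) - 1 = 2*(ε * 2 ^ (k-j-1) * (o : Int)) - 1 := by ring
      rw [hform] at hdvd
      omega
    · intro hjeq
      subst hjeq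
      simp only [Nat.sub_self, pow_zero]
      obtain ⟨t, hot⟩ : ∃ t : Nat, o = 2*t+1 := ⟨o/2, by omega⟩
      rcases hε with rfl | rfl
      · refine ⟨(t : Int), by rw [hot]; push_cast; ring⟩
      · refine ⟨-(t : Int) - 1, by rw [hot]; push_cast; ring⟩
  rcases hval with hv | hv
  · exact key 1 (Or.inl rfl) (by rw [hv]; ring)
  · exact key (-1) (Or.inr rfl) (by rw [hv]; ring)

-- the fuel loop finds the first index k satisfying the condition
theorem solutionLoop_eq (num : Int) (k : Nat)
    (hcond : PySem.Int.mod (num - ((2:Int) ^ k - 1)) ((2:Int) ^ (k + 1)) = 0)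
    (hnot : ∀ j, j < k → ¬ PySem.Int.mod (num - ((2:Int) ^ j - 1)) ((2:Int) ^ (j + 1)) = 0) :
    ∀ fuel i, i ≤ k → k < i + fuel → solutionLoop num i fuel = some (num + (2:Int) ^ (k - 1)) := by
  intro fuel
  induction fuel with
  | zero => intro i h1 h2; omega
  | succ fuel ih =>
      intro i h1 h2
      by_cases hik : i = k
      · subst hik
        simp only [solutionLoop]
        rw [if_pos hcond]
      · have hlt : i < k := by omega
        simp only [solutionLoop, if_neg (hnot i hlt)]
        exact ih (i+1) (by omega) (by omega)

-- per odd element: A's loop returns exactly B's value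
theorem loop_eq_next (num : Int) (hdom : pvDomInt num = true)
    (hodd : ¬ PySem.Int.mod num 2 = 0) (hne : num ≠ -1) :
    solutionLoop num 0 500000000000000 = some (nextNum num) := by
  have hdvd : ¬ (2:Int) ∣ num := by
    rw [← PySem.Int.mod_eq_zero_iff_dvd]; exact hodd
  have hbound : -2147483648 ≤ num ∧ num ≤ 2147483648 := by
    simpa [pvDomInt] using hdom
  have hN0 : (num + 1).natAbs ≠ 0 := by omega
  obtain ⟨k, o, hoodd, hN⟩ := Nat.exists_eq_two_pow_mul_odd hN0
  have ho : o % 2 = 1 := Nat.odd_iff.mp hoodd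
  -- k ≥ 1: num odd → num+1 even → |num+1| even
  have hNeven : (num + 1).natAbs % 2 = 0 := by
    rcases Int.even_or_odd num with he | hodd'
    · exact absurd he.two_dvd hdvd
    · obtain ⟨t, rfl⟩ := hodd'; omega
  have hk1 : 1 ≤ k := by
    by_contra h
    have : k = 0 := by omega
    subst this
    simp at hN
    omega
  -- k ≤ 31 from the domain bound
  have hkle : k ≤ 31 := by
    by_contra h
    have h32 : 32 ≤ k := by omega
    have hle : 2^32 ≤ 2^k := Nat.pow_le_pow_right (by norm_num) h32
    have h32v : (2:Nat)^32 = 4294967296 := by norm_num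
    have hNle : (num + 1).natAbs ≤ 2147483649 := by omega
    have : 2^k ≤ 2^k*o := Nat.le_mul_of_pos_right _ (by omega)
    omega
  have hval : num + 1 = ((2^k*o : Nat) : Int) ∨ num + 1 = -((2^k*o : Nat) : Int) := by
    rw [← hN]
    exact Int.natAbs_eq (num + 1)
  have hcond := (cond_iff num k k o ho (le_refl k) hval).mpr rfl
  have hnot : ∀ j, j < k → ¬ PySem.Int.mod (num - ((2:Int) ^ j - 1)) ((2:Int) ^ (j + 1)) = 0 := by
    intro j hj hc
    exact absurd ((cond_iff num j k o ho (by omega) hval).mp hc) (by omega)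
  rw [solutionLoop_eq num k hcond hnot 500000000000000 0 (by omega) (by omega)]
  -- B's value: nextNum num = num + 2^(k-1)
  have hband := band_lowbit num k o ho hdvd hne hN
  have hshift : ((2:Int)^k) >>> (1:Nat) = (2:Int)^(k-1) := by
    rw [Int.shiftRight_eq_div_pow]
    have : (2:Int)^k = 2^(k-1) * 2 := by
      rw [← pow_succ]
      congr 1
      omega
    rw [this]
    simp
  simp [nextNum, hband, hshift, hdvd]

-- top level: the fold over A's per-element step is B's map
theorem fold_eq (numbers : List Int) :
    ∀ acc : List Int, (∀ n ∈ numbers, pvDomInt n = true) → (-1 : Int) ∉ numbers →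
    numbers.foldl (fun answer num =>
      if PySem.Int.mod num 2 = 0 then answer ++ [num + 1]
      else
        match solutionLoop num 0 500000000000000 with
        | some v => answer ++ [v]
        | none => answer) acc = acc ++ numbers.map nextNum := by
  induction numbers with
  | nil => intro acc _ _; simp
  | cons num rest ih =>
      intro acc hdom hpre
      have hstep : (if PySem.Int.mod num 2 = 0 then acc ++ [num + 1]
          else
            match solutionLoop num 0 500000000000000 with
            | some v => acc ++ [v]
            | none => acc) = acc ++ [nextNum num] := by
        by_cases hpar : PySem.Int.mod num 2 = 0
        · have hdvd2 : (2:Int) ∣ num := (PySem.Int.mod_eq_zero_iff_dvd _ _).mp hpar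
          simp [nextNum, hdvd2]
        · rw [if_neg hpar, loop_eq_next num (hdom num (by simp)) hpar (by intro h; exact hpre (by simp [h]))]
      simp only [List.foldl_cons, hstep, List.map_cons]
      rw [ih (acc ++ [nextNum num]) (fun n hn => hdom n (by simp [hn])) (fun h => hpre (by simp [h]))]
      simp

-- ===== VERDICT (by name: the statement is the Claim_ definition above) =====
theorem solution_spec : Claim_equal_solution := by
  intro numbers hdom hpre
  unfold Spec_solution solution solution_alt
  have hall : ∀ n ∈ numbers, pvDomInt n = true := by
    intro n hn
    unfold Dom_solution at hdom
    rw [List.all_eq_true] at hdom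
    exact hdom n hn
  simpa using fold_eq numbers [] hall hpre
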